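-- pv_equiv track=rewrite | github.com/speechbrain/speechbrain | recipes/ResearchMatch/lexconvert.py | festival_group_stress
-- ===== SOURCE A (Python) =====
-- def festival_group_stress(pronunc):
--    "Special-case cleanup_func for the Festival format"
--    # TODO: do we ever need to add extra consonants to the
--    # previous group instead of the next group?  (not sure
--    # what difference it makes to the synthesis, but it
--    # might make the entry a bit more readable)
--    groups = [] ; thisGroup = [[],'0',False] # phon,stress,complete
--    for phon in pronunc.split():
--       if phon in ['0','1','2']:
--          if groups and phon >= groups[-1][1]:
--             groups[-1][1]=phon
--          continue
--       thisGroup[0].append(phon)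
--       if phon[:1] in 'aeiou@':
--          thisGroup[2]=True
--          groups.append(thisGroup)
--          thisGroup = [[],'0',False]
--    if thisGroup[0]: groups.append(thisGroup)
--    if len(groups)>=2 and not groups[-1][2]:
--       groups[-2][0] += groups[-1][0]
--       del groups[-1]
--    return "("+' '.join(("(("+' '.join(g[0])+') '+g[1]+")") for g in groups)+")"
-- ===== SOURCE B (Python) =====
-- def festival_group_stress(pronunc):
--    "Special-case cleanup_func for the Festival format"
--    # Single right-to-left pass: walking the tokens in reverse, a vowel closes
--    # the group of the previously seen vowel, trailing consonants and stress
--    # markers attach to the group being formed, so no lookback mutation of an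
--    # already-emitted group is ever needed.
--    groups = []        # completed groups, built back to front
--    pend = None        # [phons, stress] of the most recently seen vowel's group
--    tail = []          # consonants to the right of the last vowel
--    best = '0'         # strongest stress marker seen since the last vowel
--    for tok in reversed(pronunc.split()):
--       if tok in ('0', '1', '2'):
--          if best < tok:
--             best = tok
--       elif tok[:1] in 'aeiou@':
--          if pend is None:
--             pend = [[tok] + tail, best]   # trailing consonants join this group
--             tail = []
--          else:
--             groups.insert(0, pend)
--             pend = [[tok], best]
--          best = '0'
--       elif pend is None:
--          tail.insert(0, tok)
--       else:
--          pend[0].insert(0, tok)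
--    if pend is not None:
--       groups.insert(0, pend)
--    elif tail:
--       groups = [[tail, '0']]
--    return "(" + ' '.join("((" + ' '.join(g[0]) + ') ' + g[1] + ")" for g in groups) + ")"
-- ===== Notes on version B (the rewrite author's own statement) =====
-- stated objective: alternative
-- what changed: A scans left-to-right, mutating the stress of the last already-emitted group in place and patching a trailing incomplete group afterwards; B scans the tokens right-to-left in one pass, building the group list back to front by prepending, so every stress marker and trailing consonant attaches to the group currently being formed and no emitted group is ever revisited or merged.
import Mathlib
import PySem

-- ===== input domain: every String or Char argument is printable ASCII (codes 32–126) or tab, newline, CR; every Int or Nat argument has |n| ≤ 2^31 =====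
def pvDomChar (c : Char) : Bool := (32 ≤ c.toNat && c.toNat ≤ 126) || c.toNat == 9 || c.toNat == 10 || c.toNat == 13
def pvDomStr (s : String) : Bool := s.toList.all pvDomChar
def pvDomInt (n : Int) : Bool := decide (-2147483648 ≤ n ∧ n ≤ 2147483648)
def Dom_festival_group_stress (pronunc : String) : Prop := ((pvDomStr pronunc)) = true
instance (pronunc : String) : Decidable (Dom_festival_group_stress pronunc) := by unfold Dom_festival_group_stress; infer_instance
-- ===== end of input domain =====

-- B replaces A's left-to-right loop (which mutates the last emitted group's stress
-- and patches a trailing incomplete group afterwards) by a single right-to-left pass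
-- building the group list back to front; same return value, objective: alternative.

-- ===== PORT A =====
-- `phon in ['0','1','2']` and `phon[:1] in 'aeiou@'`
def pvIsStressTokA (phon : String) : Bool := phon == "0" || phon == "1" || phon == "2"

def pvIsVowelTokA (phon : String) : Bool :=
  PySem.Str.isIn (PySem.Str.slice phon none (some 1)) "aeiou@"

-- `if groups and phon >= groups[-1][1]: groups[-1][1] = phon`
def pvModLastStress (phon : String) : List (List String × String × Bool) → List (List String × String × Bool)
  | [] => []
  | [g] => if g.2.1 ≤ phon then [(g.1, phon, g.2.2)] else [g]
  | g :: h :: rest => g :: pvModLastStress phon (h :: rest)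

-- A's single fused loop; state = (groups, thisGroup) exactly as in the Python
def pvLoopA : List String → List (List String × String × Bool) → (List String × String × Bool) →
    List (List String × String × Bool) × (List String × String × Bool)
  | [], groups, tg => (groups, tg)
  | phon :: rest, groups, tg =>
    if pvIsStressTokA phon then pvLoopA rest (pvModLastStress phon groups) tg
    else
      let tg1 := (tg.1 ++ [phon], tg.2.1, tg.2.2)
      if pvIsVowelTokA phon then pvLoopA rest (groups ++ [(tg1.1, tg1.2.1, true)]) ([], "0", false)
      else pvLoopA rest groups tg1

-- A's code after the loop: `if thisGroup[0]: …`, the tail merge, and the formatting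
-- `if len(groups)>=2 and not groups[-1][2]: groups[-2][0] += groups[-1][0]; del groups[-1]`
def pvTailMergeA (groups0 : List (List String × String × Bool)) : List (List String × String × Bool) :=
  match groups0.reverse with
  | last :: prev :: rest =>
      if last.2.2 = false then ((prev.1 ++ last.1, prev.2.1, prev.2.2) :: rest).reverse
      else groups0
  | _ => groups0

def pvRenderA (groups : List (List String × String × Bool)) : String :=
  "(" ++ PySem.Str.join " " (groups.map (fun g => "((" ++ PySem.Str.join " " g.1 ++ ") " ++ g.2.1 ++ ")")) ++ ")"

def pvFinishA (r : List (List String × String × Bool) × (List String × String × Bool)) : String :=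
  pvRenderA (pvTailMergeA (if r.2.1 ≠ [] then r.1 ++ [r.2] else r.1))

def festival_group_stress (pronunc : String) : String :=
  pvFinishA (pvLoopA (PySem.Str.split₀ pronunc) [] ([], "0", false))

-- ===== PORT B =====
-- `tok in ('0','1','2')` and `tok[:1] in 'aeiou@'`
def pvIsStressTokB (tok : String) : Bool := tok == "0" || tok == "1" || tok == "2"

def pvIsVowelTokB (tok : String) : Bool :=
  PySem.Str.isIn (PySem.Str.slice tok none (some 1)) "aeiou@"

-- B's state: (groups built back to front, pend, tail, best)
abbrev PvBSt : Type :=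
  List (List String × String) × Option (List String × String) × List String × String

-- one step of B's reverse walk (the body of `for tok in reversed(...)`)
def pvStepB (s : PvBSt) (tok : String) : PvBSt :=
  if pvIsStressTokB tok then
    (s.1, s.2.1, s.2.2.1, if s.2.2.2 < tok then tok else s.2.2.2)
  else if pvIsVowelTokB tok then
    match s.2.1 with
    | none => (s.1, some (tok :: s.2.2.1, s.2.2.2), [], "0")
    | some p => (p :: s.1, some ([tok], s.2.2.2), s.2.2.1, "0")
  else
    match s.2.1 with
    | none => (s.1, none, tok :: s.2.2.1, s.2.2.2)
    | some p => (s.1, some (tok :: p.1, p.2), s.2.2.1, s.2.2.2)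

def pvRender (gs : List (List String × String)) : String :=
  "(" ++ PySem.Str.join " " (gs.map (fun g => "((" ++ PySem.Str.join " " g.1 ++ ") " ++ g.2 ++ ")")) ++ ")"

-- B's code after the loop: flush `pend` / promote `tail`, then format
def pvFinishB (s : PvBSt) : String :=
  let groups :=
    match s.2.1 with
    | some p => p :: s.1
    | none => if s.2.2.1 ≠ [] then [(s.2.2.1, "0")] else s.1
  pvRender groups

def festival_group_stress_alt (pronunc : String) : String :=
  pvFinishB (((PySem.Str.split₀ pronunc).reverse).foldl pvStepB ([], none, [], "0"))

-- ===== PRECONDITION & SPEC =====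
def Spec_festival_group_stress (pronunc : String) (out : String) : Prop := out = festival_group_stress_alt pronunc
instance (pronunc : String) (out : String) : Decidable (Spec_festival_group_stress pronunc out) := by unfold Spec_festival_group_stress; infer_instance

-- ===== CLAIM (what is proved, stated in full; the proofs are below) =====
def Claim_equal_festival_group_stress : Prop := ∀ (pronunc : String), Dom_festival_group_stress pronunc → Spec_festival_group_stress pronunc (festival_group_stress pronunc)

-- ===== LEMMAS AND PROOFS =====

lemma pvZeroLeOne : ("0" : String) ≤ "1" := by rw [String.le_iff_toList_le]; decide
lemma pvZeroLeTwo : ("0" : String) ≤ "2" := by rw [String.le_iff_toList_le]; decide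

lemma pvIfLt (a b : String) : (if a < b then b else a) = max a b := by
  rcases le_or_gt b a with h | h
  · simp [not_lt.mpr h, max_eq_left h]
  · simp [h, max_eq_right h.le]

-- A-state invariant: every emitted group is complete with stress ≥ "0"
def pvInvA (g : List (List String × String × Bool)) : Prop :=
  ∀ x ∈ g, ("0" : String) ≤ x.2.1 ∧ x.2.2 = true

-- B-state invariant: best ≥ "0"; no groups emitted before the first vowel
def pvInvB (s : PvBSt) : Prop := ("0" : String) ≤ s.2.2.2 ∧ (s.2.1 = none → s.1 = [])

def pvPair (g : List String × String × Bool) : List String × String := (g.1, g.2.1)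

-- set the last group's stress to its max with b (proof abstraction of late markers)
def pvApplyBestT (b : String) : List (List String × String × Bool) → List (List String × String × Bool)
  | [] => []
  | [g] => [(g.1, max g.2.1 b, g.2.2)]
  | g :: h :: rest => g :: pvApplyBestT b (h :: rest)

-- append trailing consonants to the last group (proof abstraction of A's tail merge)
def pvMergeLast (c : List String) : List (List String × String) → List (List String × String)
  | [] => [(c, "0")]
  | [g] => [(g.1 ++ c, g.2)]
  | g :: h :: rest => g :: pvMergeLast c (h :: rest)

-- what the final string is, as a function of A's prefix state and B's suffix state
def pvCombine (g : List (List String × String × Bool)) (cons : List String) (s : PvBSt) : String :=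
  match s.2.1 with
  | some p => pvRender ((pvApplyBestT s.2.2.2 g).map pvPair ++ (cons ++ p.1, p.2) :: s.1)
  | none =>
      if cons ++ s.2.2.1 = [] then pvRender ((pvApplyBestT s.2.2.2 g).map pvPair)
      else pvRender (pvMergeLast (cons ++ s.2.2.1) ((pvApplyBestT s.2.2.2 g).map pvPair))

lemma pvInvB_step (gB : List (List String × String)) (pend : Option (List String × String))
    (tail : List String) (best : String) (t : String)
    (h0 : ("0" : String) ≤ best) (hg : pend = none → gB = []) :
    pvInvB (pvStepB (gB, pend, tail, best) t) := by
  unfold pvStepB pvInvB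
  dsimp only
  split_ifs with h1 h2 h3
  · exact ⟨le_of_lt (lt_of_le_of_lt h0 h2), hg⟩
  · exact ⟨h0, hg⟩
  · cases pend with
    | none => dsimp only; exact ⟨le_refl _, by simp⟩
    | some p => dsimp only; exact ⟨le_refl _, by simp⟩
  · cases pend with
    | none => dsimp only; exact ⟨h0, fun _ => hg rfl⟩
    | some p => dsimp only; exact ⟨h0, by simp⟩

lemma pvInvB_foldr (toks : List String) :
    pvInvB (toks.foldr (fun tok s => pvStepB s tok) ([], none, [], "0")) := by
  induction toks with
  | nil => exact ⟨le_refl _, fun _ => rfl⟩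
  | cons t rest ih =>
      obtain ⟨h0, hg⟩ := ih
      exact pvInvB_step _ _ _ _ t h0 hg

lemma pvApplyBestT_zero (g : List (List String × String × Bool)) (h : pvInvA g) :
    pvApplyBestT "0" g = g := by
  induction g with
  | nil => rfl
  | cons x t ih =>
      cases t with
      | nil => simp [pvApplyBestT, max_eq_left (h x (by simp)).1]
      | cons y r =>
          have := ih (fun z hz => h z (by simp [hz]))
          simpa [pvApplyBestT] using this

lemma pvModLastStress_ne_nil (t : String) (l : List (List String × String × Bool)) (h : l ≠ []) :
    pvModLastStress t l ≠ [] := by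
  cases l with
  | nil => exact absurd rfl h
  | cons y r =>
      cases r with
      | nil => simp only [pvModLastStress]; split <;> simp
      | cons z w => simp [pvModLastStress]

lemma pvApplyBestT_cons (b : String) (x : List String × String × Bool)
    (l : List (List String × String × Bool)) (h : l ≠ []) :
    pvApplyBestT b (x :: l) = x :: pvApplyBestT b l := by
  cases l with
  | nil => exact absurd rfl h
  | cons y r => rfl

lemma pvApplyBestT_modLast (b t : String) (g : List (List String × String × Bool)) :
    pvApplyBestT b (pvModLastStress t g) = pvApplyBestT (max b t) g := by
  induction g with
  | nil => rfl
  | cons x l ih =>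
      cases l with
      | nil =>
          by_cases hle : x.2.1 ≤ t
          · simp only [pvModLastStress, if_pos hle, pvApplyBestT]
            rw [max_comm b t, ← max_assoc, max_eq_right hle]
          · simp only [pvModLastStress, if_neg hle, pvApplyBestT]
            rw [max_comm b t, ← max_assoc, max_eq_left (not_le.mp hle).le]
      | cons y r =>
          simp only [pvModLastStress]
          rw [pvApplyBestT_cons b x _ (pvModLastStress_ne_nil t _ (by simp)),
              pvApplyBestT_cons (max b t) x _ (by simp), ih]

lemma pvApplyBestT_snoc (b : String) (g : List (List String × String × Bool)) (x) :
    pvApplyBestT b (g ++ [x]) = g ++ [(x.1, max x.2.1 b, x.2.2)] := by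
  induction g with
  | nil => rfl
  | cons y l ih =>
      cases l with
      | nil => simp [pvApplyBestT]
      | cons z r => simpa [pvApplyBestT] using ih

lemma pvMergeLast_snoc (c : List String) (g : List (List String × String)) (x) :
    pvMergeLast c (g ++ [x]) = g ++ [(x.1 ++ c, x.2)] := by
  induction g with
  | nil => rfl
  | cons y l ih =>
      cases l with
      | nil => simp [pvMergeLast]
      | cons z r => simpa [pvMergeLast] using ih

lemma pvInvA_modLast (t : String) (g : List (List String × String × Bool))
    (h0 : ("0" : String) ≤ t) (h : pvInvA g) : pvInvA (pvModLastStress t g) := by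
  induction g with
  | nil => exact h
  | cons x l ih =>
      cases l with
      | nil =>
          intro z hz
          have hx := h x (by simp)
          simp only [pvModLastStress] at hz
          split at hz
          · simp only [List.mem_singleton] at hz
            subst hz
            exact ⟨h0, hx.2⟩
          · simp only [List.mem_singleton] at hz
            subst hz
            exact hx
      | cons y r =>
          intro z hz
          simp only [pvModLastStress] at hz
          rcases List.mem_cons.mp hz with rfl | hz
          · exact h z (by simp)
          · exact ih (fun w hw => h w (by simp [hw])) z hz

lemma pvStressTok_ge (t : String) (h : pvIsStressTokA t = true) : ("0" : String) ≤ t := by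
  simp only [pvIsStressTokA, Bool.or_eq_true, beq_iff_eq] at h
  rcases h with (rfl | rfl) | rfl
  · exact le_refl _
  · exact pvZeroLeOne
  · exact pvZeroLeTwo

lemma pvRenderA_eq (gs : List (List String × String × Bool)) :
    pvRenderA gs = pvRender (gs.map pvPair) := by
  simp only [pvRenderA, pvRender, List.map_map]
  rfl

lemma pvTailMergeA_of_invA (g : List (List String × String × Bool)) (h : pvInvA g) :
    pvTailMergeA g = g := by
  unfold pvTailMergeA
  cases hr : g.reverse with
  | nil => rfl
  | cons last l =>
      cases l with
      | nil => rfl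
      | cons prev rest =>
          have hm : last ∈ g := by
            rw [← List.mem_reverse, hr]; simp
          dsimp only
          rw [if_neg (by simp [(h last hm).2])]

-- base case: A's finish on state (g, cons) equals pvCombine with B's initial state
lemma pvBase (g : List (List String × String × Bool)) (cons : List String) (h : pvInvA g) :
    pvFinishA (g, (cons, "0", false)) = pvCombine g cons ([], none, [], "0") := by
  unfold pvFinishA pvCombine
  dsimp only
  rw [pvApplyBestT_zero g h]
  by_cases hc : cons = []
  · subst hc
    rw [if_neg (by simp), if_pos (show ([] : List String) ++ [] = [] by simp),
        pvTailMergeA_of_invA g h, pvRenderA_eq]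
  · rw [if_pos (by simpa using hc), if_neg (by simpa using hc)]
    rcases List.eq_nil_or_concat g with rfl | ⟨gs, p, rfl⟩
    · simp only [List.nil_append, List.map_nil]
      rw [pvRenderA_eq]
      simp [pvTailMergeA, pvMergeLast, pvPair]
    · simp only [List.concat_eq_append] at h ⊢
      have hrev : ((gs ++ [p]) ++ [(cons, "0", false)]).reverse
          = (cons, "0", false) :: p :: gs.reverse := by simp
      unfold pvTailMergeA
      rw [hrev]
      dsimp only
      rw [if_pos rfl, pvRenderA_eq]
      congr 1
      rw [show List.map pvPair (gs ++ [p]) = List.map pvPair gs ++ [pvPair p] by simp,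
          pvMergeLast_snoc]
      simp [pvPair]

-- the three step correspondences
lemma pvCombine_stress (t : String) (g : List (List String × String × Bool)) (cons : List String)
    (s : PvBSt) (h1 : pvIsStressTokB t = true) :
    pvCombine (pvModLastStress t g) cons s = pvCombine g cons (pvStepB s t) := by
  obtain ⟨gB, pend, tail, best⟩ := s
  simp only [pvStepB, if_pos h1]
  unfold pvCombine
  dsimp only
  rw [pvIfLt best t, pvApplyBestT_modLast best t g]

lemma pvCombine_vowel (t : String) (g : List (List String × String × Bool)) (cons : List String)
    (s : PvBSt) (h1 : ¬ pvIsStressTokB t = true) (h2 : pvIsVowelTokB t = true)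
    (hg : pvInvA g) (hb : pvInvB s) :
    pvCombine (g ++ [(cons ++ [t], "0", true)]) [] s = pvCombine g cons (pvStepB s t) := by
  obtain ⟨gB, pend, tail, best⟩ := s
  obtain ⟨hb0, hbg⟩ := hb
  simp only [pvStepB, if_neg h1, if_pos h2]
  cases pend with
  | none =>
      have hgB : gB = [] := hbg rfl
      subst hgB
      unfold pvCombine
      dsimp only
      rw [pvApplyBestT_zero g hg, pvApplyBestT_snoc, max_eq_right hb0]
      by_cases ht : tail = []
      · subst ht
        rw [if_pos (by simp)]
        simp [pvPair]
      · rw [if_neg (by simp [ht])]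
        simp [pvPair, pvMergeLast_snoc]
  | some p =>
      unfold pvCombine
      dsimp only
      rw [pvApplyBestT_zero g hg, pvApplyBestT_snoc, max_eq_right hb0]
      rw [List.map_append]
      simp [pvPair]

lemma pvCombine_conson (t : String) (g : List (List String × String × Bool)) (cons : List String)
    (s : PvBSt) (h1 : ¬ pvIsStressTokB t = true) (h2 : ¬ pvIsVowelTokB t = true) :
    pvCombine g (cons ++ [t]) s = pvCombine g cons (pvStepB s t) := by
  obtain ⟨gB, pend, tail, best⟩ := s
  simp only [pvStepB, if_neg h1, if_neg h2]
  cases pend with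
  | none =>
      unfold pvCombine
      dsimp only
      have hc : cons ++ t :: tail = (cons ++ [t]) ++ tail := by simp
      rw [hc]
  | some p =>
      unfold pvCombine
      dsimp only
      have hc : cons ++ t :: p.1 = (cons ++ [t]) ++ p.1 := by simp
      rw [hc]

-- main induction: running A's loop on a suffix = combining with B's reverse fold
lemma pvMain (toks : List String) : ∀ (g : List (List String × String × Bool)) (cons : List String),
    pvInvA g →
    pvFinishA (pvLoopA toks g (cons, "0", false)) =
      pvCombine g cons (toks.foldr (fun tok s => pvStepB s tok) ([], none, [], "0")) := by
  induction toks with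
  | nil =>
      intro g cons h
      exact pvBase g cons h
  | cons t rest ih =>
      intro g cons h
      simp only [List.foldr_cons]
      by_cases h1 : pvIsStressTokA t = true
      · rw [show pvLoopA (t :: rest) g (cons, "0", false)
              = pvLoopA rest (pvModLastStress t g) (cons, "0", false) by
            simp [pvLoopA, h1]]
        rw [ih (pvModLastStress t g) cons (pvInvA_modLast t g (pvStressTok_ge t h1) h)]
        exact pvCombine_stress t g cons _ h1
      · by_cases h2 : pvIsVowelTokA t = true
        · rw [show pvLoopA (t :: rest) g (cons, "0", false)
                = pvLoopA rest (g ++ [(cons ++ [t], "0", true)]) ([], "0", false) by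
              simp [pvLoopA, h1, h2]]
          rw [ih (g ++ [(cons ++ [t], "0", true)]) []
              (by
                intro z hz
                rcases List.mem_append.mp hz with hz | hz
                · exact h z hz
                · simp at hz
                  subst hz
                  exact ⟨le_refl _, rfl⟩)]
          exact pvCombine_vowel t g cons _ h1 h2 h (pvInvB_foldr rest)
        · rw [show pvLoopA (t :: rest) g (cons, "0", false)
                = pvLoopA rest g (cons ++ [t], "0", false) by
              simp [pvLoopA, h1, h2]]
          rw [ih g (cons ++ [t]) h]
          exact pvCombine_conson t g cons _ h1 h2

-- closing the loop: pvCombine on empty prefix = B's finish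
lemma pvCombine_nil (s : PvBSt) (h : pvInvB s) : pvCombine [] [] s = pvFinishB s := by
  obtain ⟨gB, pend, tail, best⟩ := s
  obtain ⟨h0, hg⟩ := h
  cases pend with
  | some p =>
      unfold pvCombine pvFinishB
      dsimp only
      simp [pvApplyBestT]
  | none =>
      have hgB : gB = [] := hg rfl
      subst hgB
      unfold pvCombine pvFinishB
      dsimp only
      by_cases ht : tail = []
      · subst ht
        simp [pvApplyBestT]
      · rw [if_neg (by simpa using ht), if_pos (by simpa using ht)]
        simp [pvApplyBestT, pvMergeLast]

-- ===== VERDICT (by name: the statement is the Claim_ definition above) =====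
theorem festival_group_stress_spec : Claim_equal_festival_group_stress := by
  intro pronunc _
  unfold Spec_festival_group_stress festival_group_stress festival_group_stress_alt
  rw [List.foldl_reverse]
  rw [pvMain (PySem.Str.split₀ pronunc) [] [] (by intro x hx; cases hx)]
  exact pvCombine_nil _ (pvInvB_foldr _)
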